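-- pv_equiv track=rewrite | github.com/yiliu-mt/vits | service/text.py | preprocess_syllable_to_phoneme
-- ===== SOURCE A (Python) =====
-- def preprocess_syllable_to_phoneme(pinyins, lexicon, oov_lexicon, default_sp="sp2"):
--     syllable_seq = []
--     phone_seq = []
--     for i, p in enumerate(pinyins):
--         if p in lexicon:
--             phone_seq += lexicon[p]
--             syllable_seq += [(len(syllable_seq), p)] * len(lexicon[p])
--         elif p in ["sp1", "sp2", "sp3", "sp4", "sp0", "sp"]:
--             phone_seq.append(p)
--             syllable_seq.append((len(syllable_seq), p))
--         else:
--             p = p.lower().strip()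
--             if p in oov_lexicon:
--                 phone_seq += oov_lexicon[p]
--                 syllable_seq += [(len(syllable_seq), p)] * len(oov_lexicon[p])
--             else:
--                 for p_char in p:
--                     if p_char in oov_lexicon:
--                         phone_seq += oov_lexicon[p_char]
--                         syllable_seq += [(len(syllable_seq), p_char)] * len(oov_lexicon[p_char])
--                     else:
--                         if i < len(pinyins) - 1:
--                             phone_seq.append(default_sp)
--                             syllable_seq.append((len(syllable_seq), default_sp))
--     return phone_seq, syllable_seq
-- ===== SOURCE B (Python) =====
-- def preprocess_syllable_to_phoneme(pinyins, lexicon, oov_lexicon, default_sp="sp2"):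
--     sp_tokens = ("sp1", "sp2", "sp3", "sp4", "sp0", "sp")
--     n = len(pinyins)
--     # Pass 1: classify each pinyin into flat (label, phones) segments.
--     segments = []
--     for i, p in enumerate(pinyins):
--         if p in lexicon:
--             segments.append((p, lexicon[p]))
--         elif p in sp_tokens:
--             segments.append((p, [p]))
--         else:
--             q = p.lower().strip()
--             if q in oov_lexicon:
--                 segments.append((q, oov_lexicon[q]))
--             else:
--                 last = i >= n - 1
--                 for c in q:
--                     if c in oov_lexicon:
--                         segments.append((c, oov_lexicon[c]))
--                     elif not last:
--                         segments.append((default_sp, [default_sp]))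
--     # Pass 2: assemble the two sequences from the segments.
--     phone_seq = []
--     syllable_seq = []
--     for label, phones in segments:
--         offset = len(phone_seq)
--         phone_seq.extend(phones)
--         syllable_seq.extend([(offset, label)] * len(phones))
--     return phone_seq, syllable_seq
-- ===== Notes on version B (the rewrite author's own statement) =====
-- stated objective: alternative
-- what changed: B splits A's single interleaved loop into two passes: first classify each pinyin into a flat list of (label, phones) segments, then assemble phone_seq and syllable_seq from the segments using the current phone count as the shared offset.
import Mathlib
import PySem

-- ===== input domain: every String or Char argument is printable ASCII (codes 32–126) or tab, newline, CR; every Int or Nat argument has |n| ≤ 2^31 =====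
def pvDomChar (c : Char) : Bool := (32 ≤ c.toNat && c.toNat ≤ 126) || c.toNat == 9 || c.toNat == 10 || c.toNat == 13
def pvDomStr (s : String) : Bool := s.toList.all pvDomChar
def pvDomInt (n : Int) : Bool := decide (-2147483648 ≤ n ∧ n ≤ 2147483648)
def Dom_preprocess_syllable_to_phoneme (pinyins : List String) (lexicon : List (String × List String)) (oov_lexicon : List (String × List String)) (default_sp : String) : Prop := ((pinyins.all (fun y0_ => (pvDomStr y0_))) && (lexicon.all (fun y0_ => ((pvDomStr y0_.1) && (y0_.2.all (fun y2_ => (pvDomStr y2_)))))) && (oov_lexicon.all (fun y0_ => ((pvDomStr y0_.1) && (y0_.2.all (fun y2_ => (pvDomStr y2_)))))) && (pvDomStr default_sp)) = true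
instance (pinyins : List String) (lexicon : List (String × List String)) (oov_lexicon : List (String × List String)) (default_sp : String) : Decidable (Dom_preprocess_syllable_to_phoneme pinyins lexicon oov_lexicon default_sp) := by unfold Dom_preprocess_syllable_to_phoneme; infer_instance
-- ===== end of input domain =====

-- B separates classification (a flat list of (label, phones) segments) from assembly
-- of the two output sequences; objective: alternative decomposition, same cost.

-- ===== PORT A =====
-- dict lookup on the association list (first match), shared by both ports
def pvGet (d : List (String × List String)) (k : String) : Option (List String) :=
  (PySem.Dict.mk d).get? k

-- inner 'for p_char in p' loop of A
def pvAcharStep (oov_lexicon : List (String × List String)) (default_sp : String)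
    (addSp : Bool) (st : List String × List (Int × String)) (c : Char) :
    List String × List (Int × String) :=
  let pc := String.singleton c
  match pvGet oov_lexicon pc with
  | some v => (st.1 ++ v, st.2 ++ List.replicate v.length (((st.2.length : Int), pc)))
  | none =>
    if addSp then (st.1 ++ [default_sp], st.2 ++ [(((st.2.length : Int), default_sp))])
    else st

-- body of A's main loop, for one (i, p)
def pvAStep (lexicon oov_lexicon : List (String × List String)) (default_sp : String)
    (n : Nat) (st : List String × List (Int × String)) (ip : Int × String) :
    List String × List (Int × String) :=
  let p := ip.2
  match pvGet lexicon p with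
  | some v => (st.1 ++ v, st.2 ++ List.replicate v.length (((st.2.length : Int), p)))
  | none =>
    if p ∈ ["sp1", "sp2", "sp3", "sp4", "sp0", "sp"] then
      (st.1 ++ [p], st.2 ++ [(((st.2.length : Int), p))])
    else
      let q := PySem.Str.strip (PySem.Str.lower p)
      match pvGet oov_lexicon q with
      | some v => (st.1 ++ v, st.2 ++ List.replicate v.length (((st.2.length : Int), q)))
      | none =>
        q.toList.foldl (pvAcharStep oov_lexicon default_sp (decide (ip.1 < (n : Int) - 1))) st

def preprocess_syllable_to_phoneme (pinyins : List String) (lexicon : List (String × List String)) (oov_lexicon : List (String × List String)) (default_sp : String) : List String × (List (Int × String)) :=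
  (PySem.List.enumerate pinyins).foldl
    (pvAStep lexicon oov_lexicon default_sp pinyins.length) ([], [])

-- ===== PORT B =====
-- pass 1: the (label, phones) segments contributed by one pinyin (i, p)
def pvSegsOf (lexicon oov_lexicon : List (String × List String)) (default_sp : String)
    (last : Bool) (p : String) : List (String × List String) :=
  match pvGet lexicon p with
  | some v => [(p, v)]
  | none =>
    if p ∈ ["sp1", "sp2", "sp3", "sp4", "sp0", "sp"] then [(p, [p])]
    else
      let q := PySem.Str.strip (PySem.Str.lower p)
      match pvGet oov_lexicon q with
      | some v => [(q, v)]
      | none =>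
        q.toList.filterMap (fun c =>
          let pc := String.singleton c
          match pvGet oov_lexicon pc with
          | some v => some (pc, v)
          | none => if last then none else some (default_sp, [default_sp]))

-- pass 2: append one segment, offset = current phone count
def pvAssemble (st : List String × List (Int × String)) (seg : String × List String) :
    List String × List (Int × String) :=
  (st.1 ++ seg.2, st.2 ++ List.replicate seg.2.length (((st.1.length : Int), seg.1)))

def preprocess_syllable_to_phoneme_alt (pinyins : List String) (lexicon : List (String × List String)) (oov_lexicon : List (String × List String)) (default_sp : String) : List String × (List (Int × String)) :=
  let n := pinyins.length
  let segments := (PySem.List.enumerate pinyins).flatMap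
    (fun ip => pvSegsOf lexicon oov_lexicon default_sp (decide (ip.1 ≥ (n : Int) - 1)) ip.2)
  segments.foldl pvAssemble ([], [])

-- ===== PRECONDITION & SPEC =====
def Spec_preprocess_syllable_to_phoneme (pinyins : List String) (lexicon : List (String × List String)) (oov_lexicon : List (String × List String)) (default_sp : String) (out : List String × (List (Int × String))) : Prop := out = preprocess_syllable_to_phoneme_alt pinyins lexicon oov_lexicon default_sp
instance (pinyins : List String) (lexicon : List (String × List String)) (oov_lexicon : List (String × List String)) (default_sp : String) (out : List String × (List (Int × String))) : Decidable (Spec_preprocess_syllable_to_phoneme pinyins lexicon oov_lexicon default_sp out) := by unfold Spec_preprocess_syllable_to_phoneme; infer_instance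

-- ===== CLAIM (what is proved, stated in full; the proofs are below) =====
def Claim_equal_preprocess_syllable_to_phoneme : Prop := ∀ (pinyins : List String) (lexicon : List (String × List String)) (oov_lexicon : List (String × List String)) (default_sp : String), Dom_preprocess_syllable_to_phoneme pinyins lexicon oov_lexicon default_sp → Spec_preprocess_syllable_to_phoneme pinyins lexicon oov_lexicon default_sp (preprocess_syllable_to_phoneme pinyins lexicon oov_lexicon default_sp)

-- ===== LEMMAS AND PROOFS =====

-- the assembly step A uses implicitly: offset = current syllable count
def pvAsmA (st : List String × List (Int × String)) (seg : String × List String) :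
    List String × List (Int × String) :=
  (st.1 ++ seg.2, st.2 ++ List.replicate seg.2.length (((st.2.length : Int), seg.1)))

lemma pvChar_fold (oov_lexicon : List (String × List String)) (default_sp : String)
    (last : Bool) (cs : List Char) (st : List String × List (Int × String)) :
    cs.foldl (pvAcharStep oov_lexicon default_sp (!last)) st
      = (cs.filterMap (fun c =>
          let pc := String.singleton c
          match pvGet oov_lexicon pc with
          | some v => some (pc, v)
          | none => if last then none else some (default_sp, [default_sp]))).foldl pvAsmA st := by
  induction cs generalizing st with
  | nil => rfl
  | cons c cs ih =>
    simp only [List.foldl_cons, List.filterMap_cons]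
    cases h : pvGet oov_lexicon (String.singleton c) with
    | some v =>
      simp only [pvAcharStep, h, List.foldl_cons, pvAsmA]
      exact ih _
    | none =>
      cases last with
      | true => simp only [pvAcharStep, h, Bool.not_true]; exact ih _
      | false =>
        simp only [pvAcharStep, h, Bool.not_false, if_true]
        exact ih _

lemma pvStep_eq_segs (lexicon oov_lexicon : List (String × List String)) (default_sp : String)
    (n : Nat) (st : List String × List (Int × String)) (ip : Int × String) :
    pvAStep lexicon oov_lexicon default_sp n st ip
      = (pvSegsOf lexicon oov_lexicon default_sp (decide (ip.1 ≥ (n : Int) - 1)) ip.2).foldl pvAsmA st := by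
  unfold pvAStep pvSegsOf
  cases h : pvGet lexicon ip.2 with
  | some v => simp [h, pvAsmA]
  | none =>
    by_cases hsp : ip.2 ∈ ["sp1", "sp2", "sp3", "sp4", "sp0", "sp"]
    · simp [h, hsp, pvAsmA]
    · cases h2 : pvGet oov_lexicon (PySem.Str.strip (PySem.Str.lower ip.2)) with
      | some v => simp [h, hsp, h2, pvAsmA]
      | none =>
        have hb : decide (ip.1 < (n : Int) - 1) = !(decide (ip.1 ≥ (n : Int) - 1)) := by
          by_cases hlt : ip.1 < (n : Int) - 1 <;> simp [hlt] <;> omega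
        simp only [h, hsp, h2, if_false]
        rw [hb, pvChar_fold]

lemma pvAsm_eq (segs : List (String × List String)) (st : List String × List (Int × String))
    (hlen : st.1.length = st.2.length) :
    segs.foldl pvAsmA st = segs.foldl pvAssemble st := by
  induction segs generalizing st with
  | nil => rfl
  | cons seg segs ih =>
    simp only [List.foldl_cons]
    have h1 : pvAsmA st seg = pvAssemble st seg := by
      simp [pvAsmA, pvAssemble, hlen]
    rw [h1]
    exact ih _ (by simp [pvAssemble, hlen])

lemma pvAssemble_len (segs : List (String × List String))
    (st : List String × List (Int × String)) (hlen : st.1.length = st.2.length) :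
    (segs.foldl pvAssemble st).1.length = (segs.foldl pvAssemble st).2.length := by
  induction segs generalizing st with
  | nil => exact hlen
  | cons seg segs ih => exact ih _ (by simp [pvAssemble, hlen])

lemma pvOuter_eq (g : Int × String → List (String × List String))
    (l : List (Int × String)) (st : List String × List (Int × String))
    (hlen : st.1.length = st.2.length) :
    l.foldl (fun st ip => (g ip).foldl pvAsmA st) st
      = l.foldl (fun st ip => (g ip).foldl pvAssemble st) st := by
  induction l generalizing st with
  | nil => rfl
  | cons ip l ih =>
    simp only [List.foldl_cons]
    rw [pvAsm_eq _ _ hlen]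
    exact ih _ (pvAssemble_len _ _ hlen)

-- ===== VERDICT (by name: the statement is the Claim_ definition above) =====
theorem preprocess_syllable_to_phoneme_spec : Claim_equal_preprocess_syllable_to_phoneme := by
  intro pinyins lexicon oov_lexicon default_sp _
  unfold Spec_preprocess_syllable_to_phoneme
  unfold preprocess_syllable_to_phoneme preprocess_syllable_to_phoneme_alt
  rw [List.foldl_flatMap]
  rw [show (pvAStep lexicon oov_lexicon default_sp pinyins.length)
      = (fun st ip => (pvSegsOf lexicon oov_lexicon default_sp
          (decide (ip.1 ≥ (pinyins.length : Int) - 1)) ip.2).foldl pvAsmA st) from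
    funext fun st => funext fun ip => pvStep_eq_segs _ _ _ _ st ip]
  exact pvOuter_eq _ _ _ rfl
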